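-- pv_equiv track=rewrite | github.com/Jellemvdl/ITL | Exercise2/context_trees.py | findRightChild
-- ===== SOURCE A (Python) =====
-- def findRightChild(t: str, i: int) -> int:
--     t_reversed = t[::-1] # Reverse t
--     if i < 0 or i >= len(t_reversed):
--         return -1  # No right child
--     if t_reversed[i] == '0':
--         return -1
--     count = 1
--     rightchild_pos = i + 1
--     while count != 0:
--         if rightchild_pos >= len(t_reversed):
--             return -1  # No right child
--         if t_reversed[rightchild_pos] == '1':
--             count += 1
--         else:
--             count -= 1
--         rightchild_pos += 1
--     if rightchild_pos >= len(t_reversed):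
--         return -1  # No right child
--     return rightchild_pos  # Position of the right child
-- ===== SOURCE B (Python) =====
-- def findRightChild(t: str, i: int) -> int:
--     # Different algorithm: prefix-depth array + hash index of depths,
--     # instead of A's early-terminating counter scan.
--     r = t[::-1]  # Reverse t
--     n = len(r)
--     if i < 0 or i >= n or r[i] == '0':
--         return -1
--     # d[j] = (#'1') - (#others) among r[:j]
--     acc = 0
--     d = [0]
--     for c in r:
--         acc += 1 if c == '1' else -1
--         d.append(acc)
--     # occ[v] = smallest j > i with d[j+1] == v (descending j: last write wins)
--     occ = {}
--     for j in reversed(range(i + 1, n)):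
--         occ[d[j + 1]] = j
--     k = occ.get(d[i + 1] - 1, -1)
--     return k + 1 if k != -1 and k + 1 < n else -1
-- ===== Notes on version B (the rewrite author's own statement) =====
-- stated objective: alternative
-- what changed: Replaces A's early-terminating mutable-counter scan with a prefix-depth array plus a hash index mapping each depth value to its first position after i, looked up once to find where the depth first drops below the query position's depth.
import Mathlib
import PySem

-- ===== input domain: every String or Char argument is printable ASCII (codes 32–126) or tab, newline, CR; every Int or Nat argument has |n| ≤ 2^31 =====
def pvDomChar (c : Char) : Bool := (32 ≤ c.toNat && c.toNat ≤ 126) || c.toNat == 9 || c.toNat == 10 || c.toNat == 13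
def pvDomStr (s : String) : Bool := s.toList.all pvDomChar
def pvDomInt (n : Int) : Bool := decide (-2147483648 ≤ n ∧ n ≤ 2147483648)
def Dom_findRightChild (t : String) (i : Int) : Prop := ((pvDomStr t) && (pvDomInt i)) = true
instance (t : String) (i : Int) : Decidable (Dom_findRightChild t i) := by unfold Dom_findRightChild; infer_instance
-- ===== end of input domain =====

-- B replaces A's early-terminating counter scan by a prefix-depth array plus a dict indexing
-- depth values, looked up once (objective: alternative — structurally different, same cost).

-- ===== PORT A =====
-- the while loop of A: count/pos scan over the reversed character list
def findRightChildLoop (r : List Char) (count : Int) (pos : Int) : Int :=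
  if count ≠ 0 then
    if pos ≥ (r.length : Int) then -1
    else
      if (PySem.List.pyGet? r pos).getD ' ' = '1' then
        findRightChildLoop r (count + 1) (pos + 1)
      else
        findRightChildLoop r (count - 1) (pos + 1)
  else
    if pos ≥ (r.length : Int) then -1 else pos
termination_by ((r.length : Int) - pos).toNat
decreasing_by all_goals omega

def findRightChild (t : String) (i : Int) : Int :=
  let r := (PySem.List.slice? t.toList none none (-1)).getD []
  if i < 0 ∨ i ≥ (r.length : Int) then -1
  else if (PySem.List.pyGet? r i).getD ' ' = '0' then -1
  else findRightChildLoop r 1 (i + 1)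

-- ===== PORT B =====
def findRightChild_alt (t : String) (i : Int) : Int :=
  let r := (PySem.List.slice? t.toList none none (-1)).getD []
  let n : Int := r.length
  if i < 0 ∨ i ≥ n then -1
  else if (PySem.List.pyGet? r i).getD ' ' = '0' then -1
  else
    let ad := r.foldl (fun (s : Int × List Int) c =>
        let a := s.1 + (if c = '1' then 1 else -1)
        (a, s.2 ++ [a])) ((0 : Int), ([0] : List Int))
    let d := ad.2
    let occ := ((PySem.List.pyRange (i + 1) n 1).reverse).foldl
        (fun (dct : PySem.Dict Int Int) j =>
          dct.insert ((PySem.List.pyGet? d (j + 1)).getD 0) j) PySem.Dict.empty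
    let k := occ.getD ((PySem.List.pyGet? d (i + 1)).getD 0 - 1) (-1)
    if k ≠ -1 ∧ k + 1 < n then k + 1 else -1

-- ===== PRECONDITION & SPEC =====
def Spec_findRightChild (t : String) (i : Int) (out : Int) : Prop := out = findRightChild_alt t i
instance (t : String) (i : Int) (out : Int) : Decidable (Spec_findRightChild t i out) := by unfold Spec_findRightChild; infer_instance

-- ===== CLAIM (what is proved, stated in full; the proofs are below) =====
def Claim_equal_findRightChild : Prop := ∀ (t : String) (i : Int), Dom_findRightChild t i → Spec_findRightChild t i (findRightChild t i)

-- ===== LEMMAS AND PROOFS =====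

def pvStep (c : Char) : Int := if c = '1' then 1 else -1

def pvDep (r : List Char) (j : Nat) : Int := ((r.take j).map pvStep).sum

def pvFirstDrop (r : List Char) (p : Nat) (tgt : Int) : Option Nat :=
  (List.range' p (r.length - p)).find? (fun k => decide (pvDep r (k + 1) = tgt))

theorem pvDep_succ (r : List Char) (p : Nat) (h : p < r.length) :
    pvDep r (p + 1) = pvDep r p + pvStep r[p] := by
  unfold pvDep
  simp only [List.map_take]
  rw [List.sum_take_succ (L := List.map pvStep r) (i := p) (p := by simpa using h)]
  simp

theorem pv_loop_eq (r : List Char) :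
    ∀ (m : Nat) (c : Int) (p : Nat), c ≠ 0 → r.length - p ≤ m →
    findRightChildLoop r c (p : Int) =
      (match pvFirstDrop r p (pvDep r p - c) with
       | some k => if ((k : Int) + 1 < (r.length : Int)) then ((k : Int) + 1) else -1
       | none => -1) := by
  intro m
  induction m with
  | zero =>
    intro c p hc hm
    have hp : r.length ≤ p := by omega
    rw [findRightChildLoop]
    simp only [pvFirstDrop, Nat.sub_eq_zero_of_le hp, List.range'_zero, List.find?_nil]
    have : ((p : Int) ≥ (r.length : Int)) := by exact_mod_cast hp
    simp [hc, this]
  | succ m ih =>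
    intro c p hc hm
    by_cases hp : r.length ≤ p
    · rw [findRightChildLoop]
      simp only [pvFirstDrop, Nat.sub_eq_zero_of_le hp, List.range'_zero, List.find?_nil]
      have : ((p : Int) ≥ (r.length : Int)) := by exact_mod_cast hp
      simp [hc, this]
    · rw [Nat.not_le] at hp
      have hlt : ¬ ((p : Int) ≥ (r.length : Int)) := by exact_mod_cast Nat.not_le.mpr hp
      have hchar : (PySem.List.pyGet? r (p : Int)).getD ' ' = r[p] := by
        simp [PySem.List.pyGet?_natCast, List.getElem?_eq_getElem hp]
      have hrange : List.range' p (r.length - p) = p :: List.range' (p + 1) (r.length - (p + 1)) := by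
        have : r.length - p = (r.length - (p + 1)) + 1 := by omega
        rw [this, List.range'_succ]
      have hsucc := pvDep_succ r p hp
      rw [findRightChildLoop]
      simp only [hc, if_true, ne_eq, not_false_iff, hlt, if_false, hchar]
      by_cases h0 : c + pvStep r[p] = 0
      · -- the counter hits zero at position p
        have hpred : pvDep r (p + 1) = pvDep r p - c := by rw [hsucc]; linarith
        have hfind : pvFirstDrop r p (pvDep r p - c) = some p := by
          simp [pvFirstDrop, hrange, hpred]
        rw [hfind]
        have hcast : (p : Int) + 1 = ((p + 1 : Nat) : Int) := by push_cast; ring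
        by_cases hone : r[p] = '1'
        · have hc' : c + 1 = 0 := by simpa [pvStep, hone] using h0
          rw [if_pos hone, findRightChildLoop]
          simp only [hc', ne_eq, not_true_eq_false, if_false]
          split_ifs with h1 h2 <;> first | rfl | omega
        · have hc' : c - 1 = 0 := by have := h0; simp [pvStep, hone] at this; omega
          rw [if_neg hone, findRightChildLoop]
          simp only [hc', ne_eq, not_true_eq_false, if_false]
          split_ifs with h1 h2 <;> first | rfl | omega
      · -- the counter is still nonzero after position p
        have hpred : pvDep r (p + 1) ≠ pvDep r p - c := by rw [hsucc]; intro h; apply h0; linarith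
        have hfind : pvFirstDrop r p (pvDep r p - c) = pvFirstDrop r (p + 1) (pvDep r p - c) := by
          simp [pvFirstDrop, hrange, hpred]
        rw [hfind]
        have hcast : (p : Int) + 1 = ((p + 1 : Nat) : Int) := by push_cast; ring
        by_cases hone : r[p] = '1'
        · have hc' : c + 1 ≠ 0 := by intro h; apply h0; simp [pvStep, hone]; omega
          have htgt : pvDep r p - c = pvDep r (p + 1) - (c + 1) := by
            rw [hsucc]; simp [pvStep, hone] <;> ring
          rw [if_pos hone, hcast, htgt]
          exact ih (c + 1) (p + 1) hc' (by omega)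
        · have hc' : c - 1 ≠ 0 := by intro h; apply h0; simp [pvStep, hone]; omega
          have htgt : pvDep r p - c = pvDep r (p + 1) - (c - 1) := by
            rw [hsucc]; simp [pvStep, hone] <;> ring
          rw [if_neg hone, hcast, htgt]
          exact ih (c - 1) (p + 1) hc' (by omega)

theorem pvFind_congr {α : Type} (l : List α) (p q : α → Bool) (h : ∀ x ∈ l, p x = q x) :
    l.find? p = l.find? q := by
  induction l with
  | nil => rfl
  | cons a l ih =>
    simp only [List.find?_cons]
    rw [h a (List.mem_cons_self)]
    cases q a
    · exact ih (fun x hx => h x (List.mem_cons_of_mem a hx))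
    · rfl

theorem pvDep_append (r : List Char) (c : Char) (j : Nat) (h : j ≤ r.length) :
    pvDep (r ++ [c]) j = pvDep r j := by
  simp [pvDep, List.take_append_of_le_length h]

theorem pvDep_append_last (r : List Char) (c : Char) :
    pvDep (r ++ [c]) (r.length + 1) = pvDep r r.length + pvStep c := by
  have h1 : (r ++ [c]).take (r.length + 1) = r ++ [c] := by
    apply List.take_of_length_le; simp
  have h2 : r.take r.length = r := List.take_length ..
  simp [pvDep, h1, h2]

theorem pv_d_fold (r : List Char) :
    r.foldl (fun (s : Int × List Int) c =>
        let a := s.1 + (if c = '1' then 1 else -1)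
        (a, s.2 ++ [a])) ((0 : Int), ([0] : List Int)) =
      (pvDep r r.length, (List.range (r.length + 1)).map (fun j => pvDep r j)) := by
  induction r using List.reverseRecOn with
  | nil => simp [pvDep]
  | append_singleton r c ih =>
    rw [List.foldl_append, ih]
    simp only [List.foldl_cons, List.foldl_nil, List.length_append, List.length_singleton]
    refine Prod.ext ?_ ?_
    · simp only
      rw [pvDep_append_last]
      rfl
    · simp only
      have h2 : List.map (fun j => pvDep (r ++ [c]) j) (List.range (r.length + 1)) =
          List.map (fun j => pvDep r j) (List.range (r.length + 1)) := by
        apply List.map_congr_left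
        intro j hj
        exact pvDep_append r c j (Nat.lt_succ_iff.mp (List.mem_range.mp hj))
      have h3 : List.range (r.length + 1 + 1) = List.range (r.length + 1) ++ [r.length + 1] :=
        List.range_succ
      rw [h3, List.map_append, h2, List.map_cons, List.map_nil, pvDep_append_last]
      rfl

theorem pv_d_get (r : List Char) (j : Int) (h0 : 0 ≤ j) (h1 : j ≤ (r.length : Int)) :
    (PySem.List.pyGet? ((List.range (r.length + 1)).map (fun j => pvDep r j)) j).getD 0
      = pvDep r j.toNat := by
  have hj : j.toNat < r.length + 1 := by omega
  rw [PySem.List.pyGet?_of_nonneg _ h0]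
  simp [List.getElem?_map, List.getElem?_range, hj]

theorem pv_dict_fold (js : List Int) (kf : Int → Int) (d0 : PySem.Dict Int Int) (v dflt : Int) :
    (js.foldl (fun dct j => dct.insert (kf j) j) d0).getD v dflt =
      (match js.reverse.find? (fun j => decide (kf j = v)) with
       | some j => j
       | none => d0.getD v dflt) := by
  induction js using List.reverseRecOn with
  | nil => simp
  | append_singleton js j ih =>
    rw [List.foldl_append]
    simp only [List.foldl_cons, List.foldl_nil, List.reverse_append, List.reverse_singleton,
      List.singleton_append, List.find?_cons]
    rw [PySem.Dict.getD_insert]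
    by_cases hv : v = kf j
    · simp [hv]
    · have : (decide (kf j = v)) = false := by simp; omega
      simp only [this, if_neg hv]
      exact ih

theorem pvFirstDrop_eq (r : List Char) (p : Nat) (tgt : Int) :
    pvFirstDrop r p tgt =
      ((List.range (r.length - p)).find? (fun k => decide (pvDep r (p + k + 1) = tgt))).map
        (fun k => p + k) := by
  rw [pvFirstDrop, List.range'_eq_map_range, List.find?_map]
  congr 1

theorem pv_align (r : List Char) (i : Int) (hi0 : 0 ≤ i) (hilen : i < (r.length : Int)) (tgt : Int) :
    (PySem.List.pyRange (i + 1) ((r.length : Int)) 1).find?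
        (fun j => decide ((PySem.List.pyGet?
            ((List.range (r.length + 1)).map (fun j => pvDep r j)) (j + 1)).getD 0 = tgt))
      = ((List.range (r.length - (i.toNat + 1))).find?
          (fun k => decide (pvDep r (i.toNat + 1 + k + 1) = tgt))).map
        (fun k => i + 1 + (k : Int)) := by
  rw [PySem.List.pyRange_one, List.find?_map]
  have hm : (((r.length : Int)) - (i + 1)).toNat = r.length - (i.toNat + 1) := by omega
  rw [hm]
  have hpred : ∀ x ∈ List.range (r.length - (i.toNat + 1)),
      ((fun j => decide ((PySem.List.pyGet?
            ((List.range (r.length + 1)).map (fun j => pvDep r j)) (j + 1)).getD 0 = tgt)) ∘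
        (fun k : Nat => i + 1 + (k : Int))) x
        = (fun k => decide (pvDep r (i.toNat + 1 + k + 1) = tgt)) x := by
    intro k hk
    have hk' : k < r.length - (i.toNat + 1) := List.mem_range.mp hk
    simp only [Function.comp]
    rw [pv_d_get r (i + 1 + k + 1) (by omega) (by push_cast; omega)]
    have ht : (i + 1 + (k : Int) + 1).toNat = i.toNat + 1 + k + 1 := by omega
    rw [ht]
  rw [pvFind_congr _ _ _ hpred]
  cases List.find? (fun k => decide (pvDep r (i.toNat + 1 + k + 1) = tgt))
      (List.range (r.length - (i.toNat + 1))) <;> rfl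

theorem pv_main (t : String) (i : Int) : findRightChild t i = findRightChild_alt t i := by
  unfold findRightChild findRightChild_alt
  simp only [PySem.List.slice?_none_none_neg_one, Option.getD_some]
  by_cases hg : i < 0 ∨ i ≥ ((t.toList.reverse).length : Int)
  · simp only [if_pos hg]
  · simp only [if_neg hg]
    by_cases h0 : (PySem.List.pyGet? (t.toList.reverse) i).getD ' ' = '0'
    · simp only [if_pos h0]
    · simp only [if_neg h0]
      have hi0 : 0 ≤ i := by omega
      obtain ⟨p, rfl⟩ : ∃ p : Nat, i = (p : Int) := ⟨i.toNat, by omega⟩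
      have hilen : p < (t.toList.reverse).length := by
        have : ¬((p : Int) ≥ ((t.toList.reverse).length : Int)) := by
          intro h; exact hg (Or.inr h)
        omega
      rw [pv_d_fold]
      simp only
      rw [pv_dict_fold, List.reverse_reverse]
      rw [pv_d_get (t.toList.reverse) ((p : Int) + 1) (by omega) (by omega)]
      have ht1 : ((p : Int) + 1).toNat = p + 1 := by omega
      have ht2 : ((p : Int)).toNat = p := by omega
      rw [ht1]
      rw [pv_align (t.toList.reverse) (p : Int) (by omega)
        (by exact_mod_cast hilen) (pvDep (t.toList.reverse) (p + 1) - 1)]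
      rw [ht2]
      have hcast : ((p : Int) + 1) = ((p + 1 : Nat) : Int) := by push_cast; ring
      rw [hcast, pv_loop_eq (t.toList.reverse) (t.toList.reverse).length 1 (p + 1)
        one_ne_zero (by omega)]
      rw [pvFirstDrop_eq]
      cases hF : List.find?
          (fun k => decide (pvDep (t.toList.reverse) (p + 1 + k + 1)
            = pvDep (t.toList.reverse) (p + 1) - 1))
          (List.range ((t.toList.reverse).length - (p + 1))) with
      | none => simp
      | some k =>
        simp only [Option.map_some, Option.bind_some, Option.pure_def, Option.bind_eq_bind]
        have hnn : (0 : Int) ≤ ((p + 1 : Nat) : Int) + (k : Int) := by positivity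
        have hpc : ((p + 1 + k : Nat) : Int) = ((p + 1 : Nat) : Int) + (k : Int) := by push_cast; ring
        by_cases h1 : ((p + 1 + k : Nat) : Int) + 1 < ((t.toList.reverse).length : Int)
        · rw [if_pos h1,
            if_pos ⟨by intro heq; rw [heq] at hnn; norm_num at hnn, by rw [← hpc]; exact h1⟩,
            hpc]
        · rw [if_neg h1, if_neg (fun hc => h1 (by rw [hpc]; exact hc.2))]


-- ===== VERDICT (by name: the statement is the Claim_ definition above) =====
theorem findRightChild_spec : Claim_equal_findRightChild := by
  unfold Claim_equal_findRightChild Spec_findRightChild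
  intro t i _
  exact pv_main t i
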